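-- pv_equiv track=rewrite | github.com/lustre-tools/lustre-test-vms | ltvm_pkg/vfio.py | _looks_like_bdf
-- ===== SOURCE A (Python) =====
-- def _looks_like_bdf(s: str) -> bool:
--     """Cheap check: XXXX:XX:XX.X with hex digits."""
--     # e.g. 0000:85:00.1
--     if len(s) != 12:
--         return False
--     if s[4] != ":" or s[7] != ":" or s[10] != ".":
--         return False
--     hex_chars = set("0123456789abcdefABCDEF")
--     for i, ch in enumerate(s):
--         if i in (4, 7, 10):
--             continue
--         if ch not in hex_chars:
--             return False
--     return True
-- ===== SOURCE B (Python) =====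
-- def _looks_like_bdf(s: str) -> bool:
--     """Cheap check: XXXX:XX:XX.X with hex digits."""
--     parts = s.split(":")
--     if len(parts) != 3:
--         return False
--     tail = parts[2].split(".")
--     if len(tail) != 2:
--         return False
--     fields = [parts[0], parts[1], tail[0], tail[1]]
--     return ([len(f) for f in fields] == [4, 2, 2, 1]
--             and all(c in "0123456789abcdefABCDEF" for f in fields for c in f))
-- ===== Notes on version B (the rewrite author's own statement) =====
-- stated objective: alternative
-- what changed: B parses the string into fields by splitting on ':' and then '.', and accepts iff the split yields exactly the fields of lengths [4,2,2,1] with every field character a hex digit, instead of A's length-12 guard, positional separator comparisons and index-skipping character loop.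
import Mathlib
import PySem

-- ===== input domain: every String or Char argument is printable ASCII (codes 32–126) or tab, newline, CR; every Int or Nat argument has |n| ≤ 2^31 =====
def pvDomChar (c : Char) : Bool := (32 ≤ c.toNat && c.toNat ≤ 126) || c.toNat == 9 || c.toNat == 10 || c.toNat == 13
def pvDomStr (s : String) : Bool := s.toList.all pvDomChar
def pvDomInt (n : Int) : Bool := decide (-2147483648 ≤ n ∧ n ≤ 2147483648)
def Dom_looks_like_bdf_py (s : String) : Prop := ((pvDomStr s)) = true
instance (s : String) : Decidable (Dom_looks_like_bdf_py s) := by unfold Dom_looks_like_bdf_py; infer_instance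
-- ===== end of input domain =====

-- B validates the BDF string by splitting it into fields on ':' and then '.', and checking the
-- field lengths [4,2,2,1] and that every field character is hex, instead of A's length-12 guard,
-- positional separator comparisons and index-skipping character loop; objective: alternative.

-- ===== PORT A =====
def looks_like_bdf_py (s : String) : Bool :=
  if PySem.Str.len s ≠ (12 : Int) then false
  else if PySem.Str.pyGet? s 4 ≠ some ':' || PySem.Str.pyGet? s 7 ≠ some ':' ||
          PySem.Str.pyGet? s 10 ≠ some '.' then false
  else
    let hex_chars : PySem.Set Char := PySem.Set.ofList "0123456789abcdefABCDEF".toList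
    (PySem.List.enumerate s.toList).all (fun p =>
      if p.1 = 4 ∨ p.1 = 7 ∨ p.1 = 10 then true
      else PySem.Set.contains hex_chars p.2)

-- ===== PORT B =====
def looks_like_bdf_py_alt (s : String) : Bool :=
  -- parts = s.split(":")
  let parts := PySem.Chars.splitOn s.toList [':']
  if parts.length ≠ 3 then false
  else
    -- tail = parts[2].split(".")   (index 2 is in range: parts.length = 3)
    let tail := PySem.Chars.splitOn ((PySem.List.pyGet? parts 2).getD []) ['.']
    if tail.length ≠ 2 then false
    else
      let fields := [(PySem.List.pyGet? parts 0).getD [], (PySem.List.pyGet? parts 1).getD [],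
                     (PySem.List.pyGet? tail 0).getD [], (PySem.List.pyGet? tail 1).getD []]
      (fields.map (fun f => (f.length : Int)) == [(4 : Int), 2, 2, 1]) &&
      fields.all (fun f => f.all (fun ch =>
        PySem.Set.contains (PySem.Set.ofList "0123456789abcdefABCDEF".toList) ch))

-- ===== PRECONDITION & SPEC =====
def Spec_looks_like_bdf_py (s : String) (out : Bool) : Prop := out = looks_like_bdf_py_alt s
instance (s : String) (out : Bool) : Decidable (Spec_looks_like_bdf_py s out) := by unfold Spec_looks_like_bdf_py; infer_instance

-- ===== CLAIM (what is proved, stated in full; the proofs are below) =====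
def Claim_equal_looks_like_bdf_py : Prop := ∀ (s : String), Dom_looks_like_bdf_py s → Spec_looks_like_bdf_py s (looks_like_bdf_py s)

-- ===== LEMMAS AND PROOFS =====

-- Reference splitter: Python str.split on a single-character separator, structurally recursive.
def splitC (c : Char) : List Char → List (List Char)
  | [] => [[]]
  | x :: xs =>
    if x = c then [] :: splitC c xs
    else
      match splitC c xs with
      | [] => [[x]]
      | p :: ps => (x :: p) :: ps

theorem splitC_ne_nil (c : Char) (l : List Char) : splitC c l ≠ [] := by
  induction l with
  | nil => simp [splitC]
  | cons x xs ih =>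
    simp only [splitC]
    split_ifs
    · simp
    · rcases h : splitC c xs with _ | ⟨p, ps⟩ <;> simp

theorem go_spec (c : Char) (fuel : Nat) : ∀ (l cur : List Char) (acc : List (List Char)),
    l.length ≤ fuel →
    PySem.Chars.splitOn.go [c] fuel l cur acc =
      acc.reverse ++ ((splitC c l).modifyHead (cur.reverse ++ ·)) := by
  induction fuel with
  | zero =>
    intro l cur acc h
    have : l = [] := by simpa using h
    subst this
    simp [PySem.Chars.splitOn.go, splitC]
  | succ f ih =>
    intro l cur acc h
    cases l with
    | nil => simp [PySem.Chars.splitOn.go, splitC]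
    | cons x xs =>
      rw [PySem.Chars.splitOn.go]
      by_cases hx : x = c
      · subst hx
        simp only [List.isPrefixOf, beq_self_eq_true, Bool.true_and, if_pos,
          List.length_cons, List.length_nil, List.drop_succ_cons, List.drop_zero]
        rw [ih xs [] (cur.reverse :: acc) (by simpa using Nat.le_of_succ_le_succ (by simpa using h))]
        simp [splitC]
        rcases hs : splitC x xs with _ | ⟨p, ps⟩
        · exact absurd hs (splitC_ne_nil x xs)
        · simp
      · have hpre : [c].isPrefixOf (x :: xs) = false := by
          simp [List.isPrefixOf, beq_eq_false_iff_ne]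
          exact fun hh => hx hh.symm
        rw [if_neg (by simp [hpre])]
        rw [ih xs (x :: cur) acc (by simpa using Nat.le_of_succ_le_succ (by simpa using h))]
        simp only [splitC, if_neg hx]
        rcases hs : splitC c xs with _ | ⟨p, ps⟩
        · exact absurd hs (splitC_ne_nil c xs)
        · simp

theorem splitOn_single (c : Char) (l : List Char) :
    PySem.Chars.splitOn l [c] = splitC c l := by
  rw [PySem.Chars.splitOn, go_spec c (l.length + 1) l [] [] (by omega)]
  rcases hs : splitC c l with _ | ⟨p, ps⟩
  · exact absurd hs (splitC_ne_nil c l)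
  · simp

theorem splitC_of_not_mem (c : Char) (l : List Char) (h : c ∉ l) : splitC c l = [l] := by
  induction l with
  | nil => simp [splitC]
  | cons x xs ih =>
    simp only [List.mem_cons, not_or] at h
    simp only [splitC, if_neg (show ¬ x = c from fun hh => h.1 hh.symm), ih h.2]

theorem splitC_append (c : Char) (a t : List Char) (h : c ∉ a) :
    splitC c (a ++ c :: t) = a :: splitC c t := by
  induction a with
  | nil => simp [splitC]
  | cons x xs ih =>
    simp only [List.mem_cons, not_or] at h
    simp only [List.cons_append, splitC, if_neg (show ¬ x = c from fun hh => h.1 hh.symm), ih h.2]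

theorem splitC_shape (c : Char) : ∀ (l p : List Char) (ps : List (List Char)),
    splitC c l = p :: ps →
    c ∉ p ∧ ((ps = [] ∧ l = p) ∨ ∃ t, l = p ++ c :: t ∧ splitC c t = ps) := by
  intro l
  induction l with
  | nil =>
    intro p ps h
    simp only [splitC, List.cons.injEq] at h
    obtain ⟨h1, h2⟩ := h
    subst h1; subst h2
    exact ⟨by simp, Or.inl ⟨rfl, rfl⟩⟩
  | cons x xs ih =>
    intro p ps h
    simp only [splitC] at h
    by_cases hx : x = c
    · rw [if_pos hx] at h
      subst hx
      injection h with h1 h2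
      subst h1
      exact ⟨by simp, Or.inr ⟨xs, by simp, h2⟩⟩
    · rw [if_neg hx] at h
      rcases hs : splitC c xs with _ | ⟨q, qs⟩
      · exact absurd hs (splitC_ne_nil _ _)
      · rw [hs] at h
        obtain ⟨hq, hrest⟩ := ih q qs hs
        injection h with h1 h2
        subst h1; subst h2
        constructor
        · simp only [List.mem_cons, not_or]
          exact ⟨fun hh => hx hh.symm, hq⟩
        · rcases hrest with ⟨hps, hl⟩ | ⟨t, hl, ht⟩
          · exact Or.inl ⟨hps, by rw [hl]⟩
          · exact Or.inr ⟨t, by rw [hl]; simp, ht⟩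

-- Hex digits are neither ':' nor '.'
theorem colon_ne_of_hex (x : Char)
    (h : x ∈ "0123456789abcdefABCDEF".toList) :
    ':' ≠ x := by
  intro e; rw [← e] at h; exact absurd h (by decide)

theorem dot_ne_of_hex (x : Char)
    (h : x ∈ "0123456789abcdefABCDEF".toList) :
    '.' ≠ x := by
  intro e; rw [← e] at h; exact absurd h (by decide)

-- Both ports phrased over the character list.
def Achars (l : List Char) : Bool :=
  if (l.length : Int) ≠ (12 : Int) then false
  else if PySem.List.pyGet? l 4 ≠ some ':' || PySem.List.pyGet? l 7 ≠ some ':' ||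
          PySem.List.pyGet? l 10 ≠ some '.' then false
  else
    (PySem.List.enumerate l).all (fun p =>
      if p.1 = 4 ∨ p.1 = 7 ∨ p.1 = 10 then true
      else PySem.Set.contains (PySem.Set.ofList "0123456789abcdefABCDEF".toList) p.2)

def Bchars (l : List Char) : Bool :=
  if (splitC ':' l).length ≠ 3 then false
  else if (splitC '.' ((PySem.List.pyGet? (splitC ':' l) 2).getD [])).length ≠ 2 then false
  else
    (([(PySem.List.pyGet? (splitC ':' l) 0).getD [], (PySem.List.pyGet? (splitC ':' l) 1).getD [],
       (PySem.List.pyGet? (splitC '.' ((PySem.List.pyGet? (splitC ':' l) 2).getD [])) 0).getD [],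
       (PySem.List.pyGet? (splitC '.' ((PySem.List.pyGet? (splitC ':' l) 2).getD [])) 1).getD []] : List (List Char)).map
        (fun f => (f.length : Int)) == [(4 : Int), 2, 2, 1]) &&
    ([(PySem.List.pyGet? (splitC ':' l) 0).getD [], (PySem.List.pyGet? (splitC ':' l) 1).getD [],
      (PySem.List.pyGet? (splitC '.' ((PySem.List.pyGet? (splitC ':' l) 2).getD [])) 0).getD [],
      (PySem.List.pyGet? (splitC '.' ((PySem.List.pyGet? (splitC ':' l) 2).getD [])) 1).getD []] : List (List Char)).all
      (fun f => f.all (fun ch =>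
        PySem.Set.contains (PySem.Set.ofList "0123456789abcdefABCDEF".toList) ch))

set_option maxHeartbeats 1000000 in
theorem dirAB (l : List Char) (hA : Achars l = true) : Bchars l = true := by
  unfold Achars at hA
  split_ifs at hA with h1 h2
  have hlen : l.length = 12 := by
    push_neg at h1
    exact_mod_cast h1
  rcases l with _|⟨c0,_|⟨c1,_|⟨c2,_|⟨c3,_|⟨c4,_|⟨c5,_|⟨c6,_|⟨c7,_|⟨c8,_|⟨c9,_|⟨c10,_|⟨c11,rest⟩⟩⟩⟩⟩⟩⟩⟩⟩⟩⟩⟩ <;>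
    simp only [List.length_cons, List.length_nil] at hlen <;> try omega
  have hrest : rest = [] := by
    have : rest.length = 0 := by omega
    simpa using this
  subst hrest
  have e4710 : (c4 = ':' ∧ c7 = ':') ∧ c10 = '.' := by
    simpa [PySem.List.pyGet?, PySem.List.pyIdx?] using h2
  obtain ⟨⟨e4, e7⟩, e10⟩ := e4710
  subst e4; subst e7; subst e10
  simp only [PySem.List.enumerate, List.all_cons, List.all_nil] at hA
  norm_num at hA
  obtain ⟨g0, g1, g2, g3, g5, g6, g8, g9, g11⟩ := hA
  have n0 := colon_ne_of_hex _ g0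
  have n1 := colon_ne_of_hex _ g1
  have n2 := colon_ne_of_hex _ g2
  have n3 := colon_ne_of_hex _ g3
  have n8 := colon_ne_of_hex _ g8
  have n9 := colon_ne_of_hex _ g9
  have n11 := colon_ne_of_hex _ g11
  have m8 := dot_ne_of_hex _ g8
  have m9 := dot_ne_of_hex _ g9
  have hs1 : splitC ':' ([c0,c1,c2,c3] ++ ':' :: ([c5,c6] ++ ':' :: [c8,c9,'.',c11]))
      = [c0,c1,c2,c3] :: splitC ':' ([c5,c6] ++ ':' :: [c8,c9,'.',c11]) :=
    splitC_append _ _ _ (by simp [n0, n1, n2, n3])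
  have hs2 : splitC ':' ([c5,c6] ++ ':' :: [c8,c9,'.',c11])
      = [c5,c6] :: splitC ':' [c8,c9,'.',c11] :=
    splitC_append _ _ _ (by simp [colon_ne_of_hex _ g5, colon_ne_of_hex _ g6])
  have hs3 : splitC ':' [c8,c9,'.',c11] = [[c8,c9,'.',c11]] :=
    splitC_of_not_mem _ _ (by simp [n8, n9, n11])
  have hs45 : splitC '.' [c8,c9,'.',c11] = [[c8,c9],[c11]] := by
    have e : ([c8,c9,'.',c11] : List Char) = [c8,c9] ++ '.' :: [c11] := by simp
    rw [e, splitC_append _ _ _ (by simp [m8, m9]),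
       splitC_of_not_mem _ _ (by simp [dot_ne_of_hex _ g11])]
  unfold Bchars
  have hl : (c0::c1::c2::c3::':'::c5::c6::':'::c8::c9::'.'::c11::[])
      = [c0,c1,c2,c3] ++ ':' :: ([c5,c6] ++ ':' :: [c8,c9,'.',c11]) := by simp
  rw [hl, hs1, hs2, hs3]
  simp [PySem.List.pyGet?, PySem.List.pyIdx?, hs45]
  and_intros <;>
    first
      | simpa using g0 | simpa using g1 | simpa using g2 | simpa using g3
      | simpa using g5 | simpa using g6 | simpa using g8 | simpa using g9
      | simpa using g11

set_option maxHeartbeats 1000000 in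
theorem dirBA (l : List Char) (hB : Bchars l = true) : Achars l = true := by
  unfold Bchars at hB
  split_ifs at hB with h1 h2
  push_neg at h1
  rcases hparts : splitC ':' l with _|⟨p0, _|⟨p1, _|⟨p2, rest⟩⟩⟩ <;> rw [hparts] at h1 <;>
    simp only [List.length_cons, List.length_nil] at h1 <;> try omega
  have hrest : rest = [] := by
    have : rest.length = 0 := by omega
    simpa using this
  subst hrest
  have hget0 : (PySem.List.pyGet? [p0, p1, p2] 0).getD [] = p0 := by
    simp [PySem.List.pyGet?, PySem.List.pyIdx?]
  have hget1 : (PySem.List.pyGet? [p0, p1, p2] 1).getD [] = p1 := by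
    simp [PySem.List.pyGet?, PySem.List.pyIdx?]
  have hget2 : (PySem.List.pyGet? [p0, p1, p2] 2).getD [] = p2 := by
    simp [PySem.List.pyGet?, PySem.List.pyIdx?]
  rw [hparts, hget2] at h2
  rw [hparts, hget0, hget1, hget2] at hB
  push_neg at h2
  rcases htail : splitC '.' p2 with _|⟨t0, _|⟨t1, rest'⟩⟩ <;> rw [htail] at h2 <;>
    simp only [List.length_cons, List.length_nil] at h2 <;> try omega
  have hrest' : rest' = [] := by
    have : rest'.length = 0 := by omega
    simpa using this
  subst hrest'
  have hget0' : (PySem.List.pyGet? [t0, t1] 0).getD [] = t0 := by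
    simp [PySem.List.pyGet?, PySem.List.pyIdx?]
  have hget1' : (PySem.List.pyGet? [t0, t1] 1).getD [] = t1 := by
    simp [PySem.List.pyGet?, PySem.List.pyIdx?]
  rw [htail, hget0', hget1'] at hB
  simp only [Bool.and_eq_true, beq_iff_eq, List.map, List.cons.injEq, and_true,
    List.all_cons, List.all_nil, Bool.and_true] at hB
  obtain ⟨⟨L0, L1, L2, L3⟩, H0, H1, H2, H3⟩ := hB
  -- recover the shape of l from the splits
  obtain ⟨hn0, hsh⟩ := splitC_shape ':' l p0 [p1, p2] hparts
  rcases hsh with ⟨he, _⟩ | ⟨u1, hl1, hu1⟩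
  · exact absurd he (by simp)
  obtain ⟨hn1, hsh⟩ := splitC_shape ':' u1 p1 [p2] hu1
  rcases hsh with ⟨he, _⟩ | ⟨u2, hl2, hu2⟩
  · exact absurd he (by simp)
  obtain ⟨hn2, hsh⟩ := splitC_shape ':' u2 p2 [] hu2
  rcases hsh with ⟨_, hu2e⟩ | ⟨u3, _, hu3⟩
  swap
  · exact absurd hu3 (splitC_ne_nil _ _)
  obtain ⟨hm0, hsh'⟩ := splitC_shape '.' p2 t0 [t1] htail
  rcases hsh' with ⟨he, _⟩ | ⟨v1, hv1, hw1⟩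
  · exact absurd he (by simp)
  obtain ⟨hm1, hsh'⟩ := splitC_shape '.' v1 t1 [] hw1
  rcases hsh' with ⟨_, hv1e⟩ | ⟨v2, _, hw2⟩
  swap
  · exact absurd hw2 (splitC_ne_nil _ _)
  -- field lengths to explicit characters
  have L0' : p0.length = 4 := by exact_mod_cast L0
  have L1' : p1.length = 2 := by exact_mod_cast L1
  have L2' : t0.length = 2 := by exact_mod_cast L2
  have L3' : t1.length = 1 := by exact_mod_cast L3
  rcases p0 with _|⟨a0,_|⟨a1,_|⟨a2,_|⟨a3,r0⟩⟩⟩⟩ <;>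
    simp only [List.length_cons, List.length_nil] at L0' <;> try omega
  have hr0 : r0 = [] := by
    have : r0.length = 0 := by omega
    simpa using this
  subst hr0
  rcases p1 with _|⟨b0,_|⟨b1,r1⟩⟩ <;>
    simp only [List.length_cons, List.length_nil] at L1' <;> try omega
  have hr1 : r1 = [] := by
    have : r1.length = 0 := by omega
    simpa using this
  subst hr1
  rcases t0 with _|⟨e0,_|⟨e1,r2⟩⟩ <;>
    simp only [List.length_cons, List.length_nil] at L2' <;> try omega
  have hr2 : r2 = [] := by
    have : r2.length = 0 := by omega
    simpa using this
  subst hr2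
  rcases t1 with _|⟨f0,r3⟩ <;>
    simp only [List.length_cons, List.length_nil] at L3' <;> try omega
  have hr3 : r3 = [] := by
    have : r3.length = 0 := by omega
    simpa using this
  subst hr3
  -- assemble l
  rw [hv1e] at hv1
  rw [hv1] at hu2e
  rw [hu2e] at hl2
  rw [hl2] at hl1
  subst hl1
  simp only [List.all_cons, List.all_nil, Bool.and_true] at H0 H1 H2 H3
  simp only [Bool.and_eq_true] at H0 H1 H2
  unfold Achars
  simp only [List.cons_append, List.nil_append]
  simp [PySem.List.pyGet?, PySem.List.pyIdx?, PySem.List.enumerate]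
  and_intros <;>
    first
      | simpa using H0.1 | simpa using H0.2.1 | simpa using H0.2.2.1
      | simpa using H0.2.2.2 | simpa using H1.1 | simpa using H1.2
      | simpa using H2.1 | simpa using H2.2 | simpa using H3

theorem key (l : List Char) : Achars l = Bchars l := by
  cases hA : Achars l with
  | true => exact (dirAB l hA).symm
  | false =>
    cases hB : Bchars l with
    | true => rw [dirBA l hB] at hA; exact hA.symm ▸ rfl
    | false => rfl

-- ===== VERDICT (by name: the statement is the Claim_ definition above) =====
theorem looks_like_bdf_py_spec : Claim_equal_looks_like_bdf_py := by
  intro s _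
  unfold Spec_looks_like_bdf_py looks_like_bdf_py looks_like_bdf_py_alt
  have hB := (key s.toList).symm
  unfold Achars Bchars at hB
  simp only [PySem.Str.len_eq, PySem.Str.pyGet?_eq,
    PySem.Chars.pyGet?_eq_listPyGet?, splitOn_single] at *
  exact hB.symm
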